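-- pv_equiv track=rewrite | github.com/BrennanB/slff-draftrunner | Draft Runner.py | setup_draft
-- ===== SOURCE A (Python) =====
-- ROUND_TIMING = [2, 2, 2]
--
-- def time_math(hour, minute, additions, margin):
--     if margin == 0:
--         pass
--     else:
--         for j in range(0, additions):
--             minute += margin
--             if minute >= 60:
--                 hour += 1
--                 minute -= 60
--         if minute < 10:
--             string_minute = "0" + str(minute)
--         else:
--             string_minute = minute
--     return (str(hour) + ":" + str(string_minute)), hour, minute
--
-- def setup_draft(start_hour, start_minute, players):
--     number_of_teams = len(players)
--     r2_stats = time_math(start_hour, start_minute, number_of_teams - 1, ROUND_TIMING[0])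
--     r3_stats = time_math(r2_stats[1], r2_stats[2], number_of_teams + 1, ROUND_TIMING[1])
--     table = []
--
--     i = 0
--     for player in players:
--         team_setup = [player, time_math(start_hour, start_minute, i, ROUND_TIMING[0])[0],
--                       time_math(r2_stats[1], r2_stats[2], (number_of_teams - i), ROUND_TIMING[1])[0],
--                       time_math(r3_stats[1], r3_stats[2], i, ROUND_TIMING[2])[0], "*Live Picking*"]
--         table.append(team_setup)
--         i += 1
--     return table
-- ===== SOURCE B (Python) =====
-- ROUND_TIMING = [2, 2, 2]
--
-- def _step(hour, minute, margin):
--     minute += margin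
--     if minute >= 60:
--         return hour + 1, minute - 60
--     return hour, minute
--
-- def _fmt(hour, minute):
--     m = "0" + str(minute) if minute < 10 else str(minute)
--     return str(hour) + ":" + m
--
-- def _states(hour, minute, count, margin):
--     out = [(hour, minute)]
--     for _ in range(count):
--         hour, minute = _step(hour, minute, margin)
--         out.append((hour, minute))
--     return out
--
-- def setup_draft(start_hour, start_minute, players):
--     n = len(players)
--     s1 = _states(start_hour, start_minute, n, ROUND_TIMING[0])
--     r2h, r2m = s1[max(n - 1, 0)]
--     s2 = _states(r2h, r2m, n + 1, ROUND_TIMING[1])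
--     r3h, r3m = s2[n + 1]
--     s3 = _states(r3h, r3m, n, ROUND_TIMING[2])
--     return [[p, _fmt(*s1[i]), _fmt(*s2[n - i]), _fmt(*s3[i]), "*Live Picking*"]
--             for i, p in enumerate(players)]
-- ===== Notes on version B (the rewrite author's own statement) =====
-- stated objective: faster
-- what changed: Instead of recomputing each time from the round start with a fresh minute-by-minute loop (O(n) per row), B builds each round's clock-state prefix table once by single stepping and every row just indexes the three tables.
import Mathlib
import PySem

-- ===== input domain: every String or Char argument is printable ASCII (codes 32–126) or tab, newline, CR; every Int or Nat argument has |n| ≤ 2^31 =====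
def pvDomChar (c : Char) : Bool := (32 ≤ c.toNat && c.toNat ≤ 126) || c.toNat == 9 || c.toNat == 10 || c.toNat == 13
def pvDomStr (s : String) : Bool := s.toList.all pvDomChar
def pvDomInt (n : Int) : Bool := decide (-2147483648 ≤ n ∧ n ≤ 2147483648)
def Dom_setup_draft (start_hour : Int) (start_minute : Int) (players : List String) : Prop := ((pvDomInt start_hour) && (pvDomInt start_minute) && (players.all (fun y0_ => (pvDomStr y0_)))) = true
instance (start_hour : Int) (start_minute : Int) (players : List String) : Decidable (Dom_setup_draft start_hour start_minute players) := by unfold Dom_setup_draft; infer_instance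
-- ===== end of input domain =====

-- B replaces A's per-row minute-by-minute loops (quadratic) by three prefix tables of clock
-- states built once by single stepping; each row indexes the tables (objective: faster).

-- ===== PORT A =====
def ROUND_TIMING : List Int := [2, 2, 2]

-- Python raises NameError when margin == 0 (string_minute unbound): ported as `none`;
-- unreachable from setup_draft, which always passes margin 2.
def time_math (hour : Int) (minute : Int) (additions : Int) (margin : Int) :
    Option (String × Int × Int) :=
  if margin = 0 then none
  else
    let hm := (PySem.List.pyRange 0 additions 1).foldl
      (fun (hm : Int × Int) _ =>
        let minute := hm.2 + margin
        if minute ≥ 60 then (hm.1 + 1, minute - 60) else (hm.1, minute)) (hour, minute)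
    let string_minute :=
      if hm.2 < 10 then "0" ++ PySem.Int.toStr hm.2 else PySem.Int.toStr hm.2
    some (PySem.Int.toStr hm.1 ++ ":" ++ string_minute, hm.1, hm.2)

def setup_draft (start_hour : Int) (start_minute : Int) (players : List String) : List (List String) :=
  let number_of_teams : Int := players.length
  let mt0 := (PySem.List.pyGet? ROUND_TIMING 0).getD 0
  let mt1 := (PySem.List.pyGet? ROUND_TIMING 1).getD 0
  let mt2 := (PySem.List.pyGet? ROUND_TIMING 2).getD 0
  let r2_stats := (time_math start_hour start_minute (number_of_teams - 1) mt0).getD ("", 0, 0)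
  let r3_stats := (time_math r2_stats.2.1 r2_stats.2.2 (number_of_teams + 1) mt1).getD ("", 0, 0)
  (PySem.List.enumerate players).foldl
    (fun table ip =>
      table ++ [[ip.2,
        ((time_math start_hour start_minute ip.1 mt0).getD ("", 0, 0)).1,
        ((time_math r2_stats.2.1 r2_stats.2.2 (number_of_teams - ip.1) mt1).getD ("", 0, 0)).1,
        ((time_math r3_stats.2.1 r3_stats.2.2 ip.1 mt2).getD ("", 0, 0)).1,
        "*Live Picking*"]]) []

-- ===== PORT B =====
def pvStep (margin : Int) (hm : Int × Int) : Int × Int :=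
  let m := hm.2 + margin
  if m ≥ 60 then (hm.1 + 1, m - 60) else (hm.1, m)

def pvFmt (hm : Int × Int) : String :=
  let m := if hm.2 < 10 then "0" ++ PySem.Int.toStr hm.2 else PySem.Int.toStr hm.2
  PySem.Int.toStr hm.1 ++ ":" ++ m

def pvStates (margin : Int) (s : Int × Int) : Nat → List (Int × Int)
  | 0 => [s]
  | k + 1 => s :: pvStates margin (pvStep margin s) k

def setup_draft_alt (start_hour : Int) (start_minute : Int) (players : List String) : List (List String) :=
  let n := players.length
  let s1 := pvStates 2 (start_hour, start_minute) n
  let r2 := s1.getD (n - 1) (0, 0)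
  let s2 := pvStates 2 r2 (n + 1)
  let r3 := s2.getD (n + 1) (0, 0)
  let s3 := pvStates 2 r3 n
  (PySem.List.enumerate players).map (fun ip =>
    [ip.2, pvFmt (s1.getD ip.1.toNat (0, 0)), pvFmt (s2.getD (n - ip.1.toNat) (0, 0)),
     pvFmt (s3.getD ip.1.toNat (0, 0)), "*Live Picking*"])

-- ===== PRECONDITION & SPEC =====
def Spec_setup_draft (start_hour : Int) (start_minute : Int) (players : List String) (out : List (List String)) : Prop := out = setup_draft_alt start_hour start_minute players
instance (start_hour : Int) (start_minute : Int) (players : List String) (out : List (List String)) : Decidable (Spec_setup_draft start_hour start_minute players out) := by unfold Spec_setup_draft; infer_instance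

-- ===== CLAIM (what is proved, stated in full; the proofs are below) =====
def Claim_equal_setup_draft : Prop := ∀ (start_hour : Int) (start_minute : Int) (players : List String), Dom_setup_draft start_hour start_minute players → Spec_setup_draft start_hour start_minute players (setup_draft start_hour start_minute players)

-- ===== LEMMAS AND PROOFS =====

theorem foldl_ignore {α β : Type} (f : α → α) :
    ∀ (l : List β) (s : α), l.foldl (fun a _ => f a) s = f^[l.length] s := by
  intro l
  induction l with
  | nil => intro s; rfl
  | cons x xs ih =>
      intro s
      simp [List.foldl_cons, ih, Function.iterate_succ_apply]

theorem foldA (margin k : Int) (s : Int × Int) :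
    (PySem.List.pyRange 0 k 1).foldl (fun hm _ => pvStep margin hm) s
      = (pvStep margin)^[k.toNat] s := by
  rw [foldl_ignore, PySem.List.length_pyRange_one]
  norm_num

theorem time_math_two (h m k : Int) :
    time_math h m k 2 =
      some (pvFmt ((pvStep 2)^[k.toNat] (h, m)),
            ((pvStep 2)^[k.toNat] (h, m)).1, ((pvStep 2)^[k.toNat] (h, m)).2) := by
  have : (fun (hm : Int × Int) (_ : Int) =>
      let minute := hm.2 + 2
      if minute ≥ 60 then (hm.1 + 1, minute - 60) else (hm.1, minute))
    = fun hm _ => pvStep 2 hm := rfl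
  simp only [time_math, this, foldA]
  norm_num [pvFmt]

theorem states_getD (margin : Int) :
    ∀ (n i : Nat) (s : Int × Int), i ≤ n →
      (pvStates margin s n).getD i (0, 0) = (pvStep margin)^[i] s := by
  intro n
  induction n with
  | zero =>
      intro i s hi
      interval_cases i
      rfl
  | succ n ih =>
      intro i s hi
      cases i with
      | zero => rfl
      | succ i =>
          simp only [pvStates, List.getD_cons_succ]
          rw [ih i (pvStep margin s) (by omega), Function.iterate_succ_apply]

theorem setup_draft_eq (start_hour start_minute : Int) (players : List String) :
    setup_draft start_hour start_minute players
      = setup_draft_alt start_hour start_minute players := by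
  unfold setup_draft setup_draft_alt
  have hmt : (PySem.List.pyGet? ROUND_TIMING 0).getD 0 = 2 ∧
      (PySem.List.pyGet? ROUND_TIMING 1).getD 0 = 2 ∧
      (PySem.List.pyGet? ROUND_TIMING 2).getD 0 = 2 := by decide
  obtain ⟨h0, h1, h2⟩ := hmt
  simp only [h0, h1, h2]
  set L := players.length with hL
  rw [PySem.List.foldl_append_singleton_eq_map]
  simp only [time_math_two, Option.getD_some, List.nil_append]
  apply List.map_congr_left
  intro ip hip
  obtain ⟨k, hk, hip⟩ := (PySem.List.mem_enumerate_iff _ _ _).1 hip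
  subst hip
  simp only [zero_add]
  have hkL : k ≤ L := Nat.le_of_lt (by simpa [hL] using hk)
  have e1 : ((k : Int)).toNat = k := Int.toNat_natCast k
  have e2 : ((L : Int) - (k : Int)).toNat = L - k := by omega
  have e3 : ((L : Int) - 1).toNat = L - 1 := by omega
  have e4 : ((L : Int) + 1).toNat = L + 1 := by omega
  rw [e1, e2, e3, e4]
  simp only [Prod.mk.eta]
  rw [states_getD 2 L k _ hkL,
      states_getD 2 L (L - 1) _ (Nat.sub_le L 1),
      states_getD 2 (L + 1) (L + 1) _ (Nat.le_refl _),
      states_getD 2 (L + 1) (L - k) _ (by omega),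
      states_getD 2 L k _ hkL]

-- ===== VERDICT (by name: the statement is the Claim_ definition above) =====
theorem setup_draft_spec : Claim_equal_setup_draft := by
  intro h m ps _
  unfold Spec_setup_draft
  exact setup_draft_eq h m ps
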